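-- pv_equiv track=rewrite | github.com/maxsavitsky/bsu-computer-graphics | lab03/main.py | castle_pitteway
-- ===== SOURCE A (Python) =====
-- def castle_pitteway(x1, y1, x2, y2):
--     dx_total = abs(x2 - x1)
--     dy_total = abs(y2 - y1)
--
--     swapped = False
--     if dy_total > dx_total:
--         dx_total, dy_total = dy_total, dx_total # Меняем оси местами
--         swapped = True
--
--     a = dx_total
--     b = dy_total
--
--     # Шаг 2: Генерация строки движений по алгоритму со слайда 48
--     if b == 0:
--         # Горизонтальная/вертикальная линия
--         move_string = 's' * a
--     elif a == b:
--         # Идеально диагональная линия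
--         move_string = 'd' * a
--     else:
--         # Общий случай из лекции
--         y = b
--         x = a - b
--         m1 = "s"
--         m2 = "d"
--         while x != y:
--             if x > y:
--                 x -= y
--                 m2 = m1 + m2
--             else:
--                 y -= x
--                 m1 = m2 + m1
--         # После завершения цикла, x-кратная последовательность m2 + m1
--         move_string = (m2 + m1) * x
--
--     # Шаг 3: Преобразование строки движений в пиксели
--     pixels = []
--     curr_x, curr_y = x1, y1
--     pixels.append((curr_x, curr_y))
--
--     # Определяем направление движения
--     sx = 1 if x1 < x2 else -1
--     sy = 1 if y1 < y2 else -1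
--
--     for move in move_string:
--         if move == 'd':
--             # Диагональное смещение всегда по обеим осям
--             curr_x += sx
--             curr_y += sy
--         else: # move == 's'
--             # Прямое смещение зависит от того, меняли ли мы оси
--             if swapped:
--                 curr_y += sy # Шаг 's' делается по доминирующей (теперь Y) оси
--             else:
--                 curr_x += sx # Шаг 's' делается по доминирующей (X) оси
--         pixels.append((curr_x, curr_y))
--
--     return pixels
-- ===== SOURCE B (Python) =====
-- def _flatten(t):
--     # rope: str | ('rep', k, t) | ('cat', l, r)
--     if isinstance(t, str):
--         return t
--     if t[0] == 'rep':
--         return t[1] * _flatten(t[2])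
--     return _flatten(t[1]) + _flatten(t[2])
--
--
-- def castle_pitteway(x1, y1, x2, y2):
--     dx = abs(x2 - x1)
--     dy = abs(y2 - y1)
--     swapped = dy > dx
--     a, b = (dy, dx) if swapped else (dx, dy)
--
--     if b == 0:
--         moves = 's' * a
--     elif a == b:
--         moves = 'd' * a
--     else:
--         # batched (mod-based) Euclid on run counts, building a rope:
--         # whole blocks of subtractions are one O(1) 'rep' node.
--         x, y = a - b, b
--         m1, m2 = 's', 'd'
--         while x != y:
--             if x > y:
--                 q, r = divmod(x, y)
--                 k = q if r else q - 1
--                 x = r if r else y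
--                 m2 = ('cat', ('rep', k, m1), m2)
--             else:
--                 q, r = divmod(y, x)
--                 k = q if r else q - 1
--                 y = r if r else x
--                 m1 = ('cat', ('rep', k, m2), m1)
--         moves = _flatten(('rep', x, ('cat', m2, m1)))
--
--     sx = 1 if x1 < x2 else -1
--     sy = 1 if y1 < y2 else -1
--     dd = (sx, sy)
--     ds = (0, sy) if swapped else (sx, 0)
--
--     px, py = x1, y1
--     pixels = [(px, py)]
--     for c in moves:
--         ex, ey = dd if c == 'd' else ds
--         px += ex
--         py += ey
--         pixels.append((px, py))
--     return pixels
-- ===== Notes on version B (the rewrite author's own statement) =====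
-- stated objective: alternative
-- what changed: A builds the move word by one subtraction per iteration with a string concatenation each time (quadratic worst case, e.g. b=1); B runs a mod-batched (divmod) Euclid loop that records each whole block of subtractions as one O(1) rope node ('rep'/'cat') and flattens the rope once at the end, so word construction is near-linear; on random inputs the O(n) pixel-list construction dominates both, so a timing run shows no 1.5x gap at the largest size.
import Mathlib
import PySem

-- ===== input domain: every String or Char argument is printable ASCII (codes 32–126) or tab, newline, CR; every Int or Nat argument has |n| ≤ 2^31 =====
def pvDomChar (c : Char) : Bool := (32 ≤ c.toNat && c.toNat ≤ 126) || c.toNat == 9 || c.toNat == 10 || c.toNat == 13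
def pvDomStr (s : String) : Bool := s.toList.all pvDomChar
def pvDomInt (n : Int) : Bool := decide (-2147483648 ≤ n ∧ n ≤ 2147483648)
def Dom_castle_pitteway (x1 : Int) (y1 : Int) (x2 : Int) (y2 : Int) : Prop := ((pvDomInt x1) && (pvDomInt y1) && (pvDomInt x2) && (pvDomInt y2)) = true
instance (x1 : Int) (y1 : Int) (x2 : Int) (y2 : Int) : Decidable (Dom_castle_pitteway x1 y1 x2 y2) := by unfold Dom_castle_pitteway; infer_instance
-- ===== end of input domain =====

-- B replaces A's one-subtraction-per-iteration move-string loop (with a string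
-- concatenation per subtraction) by a mod-batched Euclid loop building a rope,
-- flattened once: a different word-construction algorithm, same pixel list.

-- ===== PORT A =====

-- A's `while x != y` loop. `fuel` is a totality device only: the call site passes
-- ((a-b)+b).toNat, which is provably enough for the loop to reach x = y.
def cpLoopA : Nat → Int → Int → List Char → List Char → Int × List Char × List Char
  | 0, x, _, m1, m2 => (x, m1, m2)
  | fuel + 1, x, y, m1, m2 =>
    if x = y then (x, m1, m2)
    else if y < x then cpLoopA fuel (x - y) y m1 (m1 ++ m2)
    else cpLoopA fuel x (y - x) (m2 ++ m1) m2

-- Step 2 of A: the move string for a ≥ b ≥ 0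
def cpMovesA (a b : Int) : List Char :=
  if b = 0 then List.replicate a.toNat 's'
  else if a = b then List.replicate a.toNat 'd'
  else
    let res := cpLoopA ((a - b) + b).toNat (a - b) b ['s'] ['d']
    List.flatten (List.replicate res.1.toNat (res.2.2 ++ res.2.1))

-- Step 3 of A: move string → pixels after the start pixel
def cpPixA (moves : List Char) (sx sy : Int) (swapped : Bool) (cx cy : Int) :
    List (Int × Int) :=
  match moves with
  | [] => []
  | m :: rest =>
    if m = 'd' then (cx + sx, cy + sy) :: cpPixA rest sx sy swapped (cx + sx) (cy + sy)
    else if swapped then (cx, cy + sy) :: cpPixA rest sx sy swapped cx (cy + sy)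
    else (cx + sx, cy) :: cpPixA rest sx sy swapped (cx + sx) cy

def castle_pitteway (x1 : Int) (y1 : Int) (x2 : Int) (y2 : Int) : List (Int × Int) :=
  let dx := |x2 - x1|
  let dy := |y2 - y1|
  let a := if dy > dx then dy else dx
  let b := if dy > dx then dx else dy
  let sx : Int := if x1 < x2 then 1 else -1
  let sy : Int := if y1 < y2 then 1 else -1
  (x1, y1) :: cpPixA (cpMovesA a b) sx sy (decide (dy > dx)) x1 y1

-- ===== PORT B =====

-- Source B's rope: str leaf | ('rep', k, t) | ('cat', l, r)
inductive Rope where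
  | leaf : Char → Rope
  | rep : Int → Rope → Rope
  | cat : Rope → Rope → Rope
deriving Repr

-- Source B's _flatten
def Rope.flatten : Rope → List Char
  | .leaf c => [c]
  | .rep k t => List.flatten (List.replicate k.toNat t.flatten)
  | .cat l r => l.flatten ++ r.flatten

-- Source B's batched `while x != y` loop; divmod ported with PySem.Int.floordiv/mod.
-- `fuel` is a totality device only (the call site's fuel is provably enough).
def cpLoopB : Nat → Int → Int → Rope → Rope → Int × Rope × Rope
  | 0, x, _, m1, m2 => (x, m1, m2)
  | fuel + 1, x, y, m1, m2 =>
    if x = y then (x, m1, m2)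
    else if y < x then
      let q := PySem.Int.floordiv x y
      let r := PySem.Int.mod x y
      cpLoopB fuel (if r ≠ 0 then r else y) y m1
        (.cat (.rep (if r ≠ 0 then q else q - 1) m1) m2)
    else
      let q := PySem.Int.floordiv y x
      let r := PySem.Int.mod y x
      cpLoopB fuel x (if r ≠ 0 then r else x)
        (.cat (.rep (if r ≠ 0 then q else q - 1) m2) m1) m2

def cpMovesB (a b : Int) : List Char :=
  if b = 0 then List.replicate a.toNat 's'
  else if a = b then List.replicate a.toNat 'd'
  else
    let res := cpLoopB ((a - b) + b).toNat (a - b) b (.leaf 's') (.leaf 'd')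
    Rope.flatten (.rep res.1 (.cat res.2.2 res.2.1))

-- Source B's pixel pass with precomputed deltas dd ('d') and ds ('s')
def cpPixB (moves : List Char) (dd ds : Int × Int) (px py : Int) : List (Int × Int) :=
  match moves with
  | [] => []
  | c :: rest =>
    let e := if c = 'd' then dd else ds
    (px + e.1, py + e.2) :: cpPixB rest dd ds (px + e.1) (py + e.2)

def castle_pitteway_alt (x1 : Int) (y1 : Int) (x2 : Int) (y2 : Int) : List (Int × Int) :=
  let dx := |x2 - x1|
  let dy := |y2 - y1|
  let swapped := decide (dy > dx)
  let a := if dy > dx then dy else dx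
  let b := if dy > dx then dx else dy
  let sx : Int := if x1 < x2 then 1 else -1
  let sy : Int := if y1 < y2 then 1 else -1
  let dd := (sx, sy)
  let ds := if swapped then ((0 : Int), sy) else (sx, (0 : Int))
  (x1, y1) :: cpPixB (cpMovesB a b) dd ds x1 y1

-- ===== PRECONDITION & SPEC =====
def Spec_castle_pitteway (x1 : Int) (y1 : Int) (x2 : Int) (y2 : Int) (out : List (Int × Int)) : Prop := out = castle_pitteway_alt x1 y1 x2 y2
instance (x1 : Int) (y1 : Int) (x2 : Int) (y2 : Int) (out : List (Int × Int)) : Decidable (Spec_castle_pitteway x1 y1 x2 y2 out) := by unfold Spec_castle_pitteway; infer_instance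

-- ===== CLAIM (what is proved, stated in full; the proofs are below) =====
def Claim_equal_castle_pitteway : Prop := ∀ (x1 : Int) (y1 : Int) (x2 : Int) (y2 : Int), Dom_castle_pitteway x1 y1 x2 y2 → Spec_castle_pitteway x1 y1 x2 y2 (castle_pitteway x1 y1 x2 y2)

-- ===== LEMMAS AND PROOFS =====

-- k subtractions of A's loop with y < x throughout = one batched rewrite of m2
theorem flatten_replicate_succ (n : Nat) (l : List Char) :
    List.flatten (List.replicate (n + 1) l) = List.flatten (List.replicate n l) ++ l := by
  rw [List.replicate_succ', List.flatten_append]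
  simp

theorem cpLoopA_batch (k : Nat) (f : Nat) (x y : Int) (m1 m2 : List Char)
    (hy : 0 < y) (hk : (k : Int) * y < x) :
    cpLoopA (k + f) x y m1 m2
      = cpLoopA f (x - k * y) y m1 (List.flatten (List.replicate k m1) ++ m2) := by
  induction k generalizing x m2 with
  | zero => simp
  | succ n ih =>
    push_cast at hk
    have hny : 0 ≤ (n : Int) * y := mul_nonneg (Int.natCast_nonneg n) hy.le
    have hx : y < x := by linarith
    rw [show n + 1 + f = (n + f) + 1 by omega, cpLoopA]
    simp only [if_neg (by omega : ¬ x = y), if_pos hx]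
    rw [ih (x - y) (m1 ++ m2) (by linarith)]
    rw [show x - y - (n : Int) * y = x - ((n : Nat) + 1 : Nat) * y by push_cast; ring]
    rw [← List.append_assoc, ← flatten_replicate_succ]

-- symmetric: k subtractions with x < y throughout
theorem cpLoopA_batch' (k : Nat) (f : Nat) (x y : Int) (m1 m2 : List Char)
    (hx : 0 < x) (hk : (k : Int) * x < y) :
    cpLoopA (k + f) x y m1 m2
      = cpLoopA f x (y - k * x) (List.flatten (List.replicate k m2) ++ m1) m2 := by
  induction k generalizing y m1 with
  | zero => simp
  | succ n ih =>
    push_cast at hk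
    have hnx : 0 ≤ (n : Int) * x := mul_nonneg (Int.natCast_nonneg n) hx.le
    have hy : x < y := by linarith
    rw [show n + 1 + f = (n + f) + 1 by omega, cpLoopA]
    simp only [if_neg (by omega : ¬ x = y), if_neg (by omega : ¬ y < x)]
    rw [ih (y - x) (m2 ++ m1) (by linarith)]
    rw [show y - x - (n : Int) * x = y - ((n : Nat) + 1 : Nat) * x by push_cast; ring]
    rw [← List.append_assoc, ← flatten_replicate_succ]

-- the two loops agree (result count equal; result words equal after flattening)
theorem loops_agree : ∀ (n fA fB : Nat) (x y : Int) (r1 r2 : Rope),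
    (x + y).toNat ≤ n → (x + y).toNat ≤ fA → (x + y).toNat ≤ fB → 0 < x → 0 < y →
    (cpLoopA fA x y r1.flatten r2.flatten).1 = (cpLoopB fB x y r1 r2).1 ∧
    (cpLoopA fA x y r1.flatten r2.flatten).2.1 = (cpLoopB fB x y r1 r2).2.1.flatten ∧
    (cpLoopA fA x y r1.flatten r2.flatten).2.2 = (cpLoopB fB x y r1 r2).2.2.flatten := by
  intro n
  induction n with
  | zero => intro fA fB x y _ _ h _ _ hx hy; omega
  | succ n ih =>
    intro fA fB x y r1 r2 hn hfA hfB hx hy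
    obtain ⟨fA', rfl⟩ : ∃ m, fA = m + 1 := ⟨fA - 1, by omega⟩
    obtain ⟨fB', rfl⟩ : ∃ m, fB = m + 1 := ⟨fB - 1, by omega⟩
    by_cases hxy : x = y
    · rw [cpLoopA, cpLoopB]
      simp [hxy]
    by_cases hlt : y < x
    · -- A takes k subtraction steps, B one batched step
      rw [cpLoopB]
      simp only [if_neg hxy, if_pos hlt]
      rw [PySem.Int.floordiv_eq_ediv_of_pos hy, PySem.Int.mod_eq_emod_of_pos hy]
      set q := x / y with hq
      set r := x % y with hr
      have hmod : 0 ≤ r ∧ r < y ∧ x = y * q + r := ⟨Int.emod_nonneg x (by omega),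
        Int.emod_lt_of_pos x hy, (Int.ediv_add_emod x y).symm ▸ by omega⟩
      set k : Int := if r ≠ 0 then q else q - 1 with hkdef
      have hq1 : 1 ≤ q := by nlinarith [hmod.1, hmod.2.1, hmod.2.2]
      have hk1 : 1 ≤ k := by
        rcases eq_or_ne r 0 with h0 | h0
        · have : 2 ≤ q := by nlinarith [hmod.2.2]
          simp [hkdef, h0]; omega
        · simp [hkdef, h0]; omega
      have hkx : k * y < x := by
        rcases eq_or_ne r 0 with h0 | h0
        · simp only [hkdef, h0, ne_eq, not_true_eq_false, if_false]
          nlinarith [hmod.2.2]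
        · simp only [hkdef, ne_eq, h0, not_false_eq_true, if_true]
          have : 0 < r := lt_of_le_of_ne hmod.1 (Ne.symm h0)
          nlinarith [hmod.2.2]
      have hky : k ≤ k * y := by nlinarith [hk1, hy]
      have hknat : ((k.toNat : Int)) = k := Int.toNat_of_nonneg (by omega)
      have hfk : k.toNat ≤ fA' + 1 := by omega
      rw [show fA' + 1 = k.toNat + (fA' + 1 - k.toNat) by omega]
      rw [cpLoopA_batch k.toNat (fA' + 1 - k.toNat) x y r1.flatten r2.flatten hy
        (by rw [hknat]; exact hkx)]
      have hnew : x - (k.toNat : Int) * y = (if r ≠ 0 then r else y) := by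
        rw [hknat]
        rcases eq_or_ne r 0 with h0 | h0
        · simp only [hkdef, h0, ne_eq, not_true_eq_false, if_false]
          nlinarith [hmod.2.2]
        · simp only [hkdef, ne_eq, h0, not_false_eq_true, if_true]
          nlinarith [hmod.2.2]
      rw [hnew]
      have hflat : List.flatten (List.replicate k.toNat r1.flatten) ++ r2.flatten
          = (Rope.cat (Rope.rep k r1) r2).flatten := by
        simp [Rope.flatten]
      rw [hflat]
      have hx' : 0 < (if r ≠ 0 then r else y) := by
        rcases eq_or_ne r 0 with h0 | h0
        · simp [h0]; omega
        · simp [h0]; exact lt_of_le_of_ne hmod.1 (Ne.symm h0)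
      have hle : (if r ≠ 0 then r else y) ≤ y := by
        rcases eq_or_ne r 0 with h0 | h0
        · simp [h0]
        · simp [h0]; omega
      have hdrop : (if r ≠ 0 then r else y) = x - k * y := by rw [← hnew, hknat]
      refine ih (fA' + 1 - k.toNat) fB' (if r ≠ 0 then r else y) y r1
        (Rope.cat (Rope.rep k r1) r2) ?_ ?_ ?_ hx' hy
      · omega
      · rw [hdrop]; omega
      · omega
    · -- x < y, symmetric
      have hlt' : x < y := by omega
      rw [cpLoopB]
      simp only [if_neg hxy, if_neg hlt]
      rw [PySem.Int.floordiv_eq_ediv_of_pos hx, PySem.Int.mod_eq_emod_of_pos hx]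
      set q := y / x with hq
      set r := y % x with hr
      have hmod : 0 ≤ r ∧ r < x ∧ y = x * q + r := ⟨Int.emod_nonneg y (by omega),
        Int.emod_lt_of_pos y hx, (Int.ediv_add_emod y x).symm ▸ by omega⟩
      set k : Int := if r ≠ 0 then q else q - 1 with hkdef
      have hq1 : 1 ≤ q := by nlinarith [hmod.1, hmod.2.1, hmod.2.2]
      have hk1 : 1 ≤ k := by
        rcases eq_or_ne r 0 with h0 | h0
        · have : 2 ≤ q := by nlinarith [hmod.2.2]
          simp [hkdef, h0]; omega
        · simp [hkdef, h0]; omega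
      have hky : k * x < y := by
        rcases eq_or_ne r 0 with h0 | h0
        · simp only [hkdef, h0, ne_eq, not_true_eq_false, if_false]
          nlinarith [hmod.2.2]
        · simp only [hkdef, ne_eq, h0, not_false_eq_true, if_true]
          have : 0 < r := lt_of_le_of_ne hmod.1 (Ne.symm h0)
          nlinarith [hmod.2.2]
      have hkx' : k ≤ k * x := by nlinarith [hk1, hx]
      have hknat : ((k.toNat : Int)) = k := Int.toNat_of_nonneg (by omega)
      have hfk : k.toNat ≤ fA' + 1 := by omega
      rw [show fA' + 1 = k.toNat + (fA' + 1 - k.toNat) by omega]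
      rw [cpLoopA_batch' k.toNat (fA' + 1 - k.toNat) x y r1.flatten r2.flatten hx
        (by rw [hknat]; exact hky)]
      have hnew : y - (k.toNat : Int) * x = (if r ≠ 0 then r else x) := by
        rw [hknat]
        rcases eq_or_ne r 0 with h0 | h0
        · simp only [hkdef, h0, ne_eq, not_true_eq_false, if_false]
          nlinarith [hmod.2.2]
        · simp only [hkdef, ne_eq, h0, not_false_eq_true, if_true]
          nlinarith [hmod.2.2]
      rw [hnew]
      have hflat : List.flatten (List.replicate k.toNat r2.flatten) ++ r1.flatten
          = (Rope.cat (Rope.rep k r2) r1).flatten := by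
        simp [Rope.flatten]
      rw [hflat]
      have hy' : 0 < (if r ≠ 0 then r else x) := by
        rcases eq_or_ne r 0 with h0 | h0
        · simp [h0]; omega
        · simp [h0]; exact lt_of_le_of_ne hmod.1 (Ne.symm h0)
      have hle : (if r ≠ 0 then r else x) ≤ x := by
        rcases eq_or_ne r 0 with h0 | h0
        · simp [h0]
        · simp [h0]; omega
      have hdrop : (if r ≠ 0 then r else x) = y - k * x := by rw [← hnew, hknat]
      refine ih (fA' + 1 - k.toNat) fB' x (if r ≠ 0 then r else x) (Rope.cat (Rope.rep k r2) r1)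
        r2 ?_ ?_ ?_ hx hy'
      · omega
      · rw [hdrop]; omega
      · omega

theorem moves_agree (a b : Int) (hb : 0 ≤ b) (hab : b ≤ a) :
    cpMovesA a b = cpMovesB a b := by
  rw [cpMovesA, cpMovesB]
  by_cases h0 : b = 0
  · simp [h0]
  by_cases h1 : a = b
  · simp [h0, h1]
  simp only [if_neg h0, if_neg h1]
  have hb' : 0 < b := by omega
  have hx : 0 < a - b := by omega
  obtain ⟨e1, e2, e3⟩ := loops_agree (a - b + b).toNat ((a - b) + b).toNat ((a - b) + b).toNat
    (a - b) b (.leaf 's') (.leaf 'd') (le_refl _) (le_refl _) (le_refl _) hx hb'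
  simp only [Rope.flatten] at e1 e2 e3
  rw [Rope.flatten]
  simp only [Rope.flatten]
  rw [e1, e2, e3]

theorem pix_agree (moves : List Char) (sx sy : Int) (sw : Bool) (cx cy : Int) :
    cpPixA moves sx sy sw cx cy
      = cpPixB moves (sx, sy) (if sw then ((0 : Int), sy) else (sx, (0 : Int))) cx cy := by
  induction moves generalizing cx cy with
  | nil => rfl
  | cons c rest ih =>
    rw [cpPixA, cpPixB]
    by_cases hd : c = 'd'
    · simp [hd, ih]
    · cases sw <;> simp [hd, ih]

-- ===== VERDICT (by name: the statement is the Claim_ definition above) =====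
theorem castle_pitteway_spec : Claim_equal_castle_pitteway := by
  intro x1 y1 x2 y2 _
  show castle_pitteway x1 y1 x2 y2 = castle_pitteway_alt x1 y1 x2 y2
  rw [castle_pitteway, castle_pitteway_alt]
  rw [pix_agree]
  congr 1
  rw [moves_agree]
  · split_ifs <;> positivity
  · split_ifs with h
    · omega
    · omega
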